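-- pv_equiv track=rewrite | github.com/sunnydas1992/AI_Assistant_Angular | backend/app/services/test_case_parser.py | _trim_trailing_tags_and_comments
-- ===== SOURCE A (Python) =====
-- from typing import List, Dict, Any, Tuple, Literal, Optional
--
-- def _trim_trailing_tags_and_comments(body_lines: List[str]) -> List[str]:
--     """Drop trailing @tag, # comment, and blank lines that belong to the next test case."""
--     result = list(body_lines)
--     while result:
--         stripped = result[-1].strip()
--         if not stripped or stripped.startswith('@') or stripped.startswith('#'):
--             result.pop()
--         else:
--             break
--     return result
-- ===== SOURCE B (Python) =====
-- def _trim_trailing_tags_and_comments(body_lines):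
--     """Drop trailing @tag, # comment, and blank lines that belong to the next test case."""
--     last_keep = -1
--     for i, line in enumerate(body_lines):
--         t = line.strip()
--         if t and not t.startswith('@') and not t.startswith('#'):
--             last_keep = i
--     return body_lines[:last_keep + 1]
-- ===== Notes on version B (the rewrite author's own statement) =====
-- stated objective: alternative
-- what changed: Replaces the backward pop-while loop with a single forward pass that records the index of the last significant line and returns one slice body_lines[:last_keep+1].
import Mathlib
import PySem

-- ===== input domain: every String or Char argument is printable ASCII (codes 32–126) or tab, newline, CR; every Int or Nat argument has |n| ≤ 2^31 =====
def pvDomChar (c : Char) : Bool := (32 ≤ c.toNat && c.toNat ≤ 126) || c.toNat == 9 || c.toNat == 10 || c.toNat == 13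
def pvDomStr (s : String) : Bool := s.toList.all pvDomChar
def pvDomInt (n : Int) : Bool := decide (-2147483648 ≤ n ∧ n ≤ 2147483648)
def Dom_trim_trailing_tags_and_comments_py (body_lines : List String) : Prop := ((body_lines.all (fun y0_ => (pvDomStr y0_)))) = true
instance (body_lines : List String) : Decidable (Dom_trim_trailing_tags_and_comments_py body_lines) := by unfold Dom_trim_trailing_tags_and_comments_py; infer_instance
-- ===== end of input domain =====

-- B replaces A's backward pop-while loop by one forward pass recording the last significant index, then a single slice (alternative decomposition, same cost).

-- ===== PORT A =====
-- while loop over `result`, popping the last element while it is blank / '@' / '#'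
def trimLoopA : List String → List String
  | r =>
    if h : r = [] then r
    else
      let stripped := PySem.Str.strip (r.getLast h)   -- result[-1].strip(): index -1 on a nonempty list is the last element
      if stripped = "" || PySem.Str.startswith stripped "@" || PySem.Str.startswith stripped "#" then
        trimLoopA r.dropLast                           -- result.pop()
      else r
termination_by r => r.length
decreasing_by
  simp [List.length_dropLast]
  exact List.length_pos_iff.mpr h

def trim_trailing_tags_and_comments_py (body_lines : List String) : List String :=
  trimLoopA body_lines

-- ===== PORT B =====
def trim_trailing_tags_and_comments_py_alt (body_lines : List String) : List String :=
  let last_keep : Int :=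
    (PySem.List.enumerate body_lines).foldl
      (fun acc p =>
        let t := PySem.Str.strip p.2
        if t ≠ "" ∧ ¬ PySem.Str.startswith t "@" ∧ ¬ PySem.Str.startswith t "#" then p.1 else acc)
      (-1)
  PySem.List.slice body_lines none (some (last_keep + 1))

-- ===== PRECONDITION & SPEC =====
def Spec_trim_trailing_tags_and_comments_py (body_lines : List String) (out : List String) : Prop := out = trim_trailing_tags_and_comments_py_alt body_lines
instance (body_lines : List String) (out : List String) : Decidable (Spec_trim_trailing_tags_and_comments_py body_lines out) := by unfold Spec_trim_trailing_tags_and_comments_py; infer_instance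

-- ===== CLAIM (what is proved, stated in full; the proofs are below) =====
def Claim_equal_trim_trailing_tags_and_comments_py : Prop := ∀ (body_lines : List String), Dom_trim_trailing_tags_and_comments_py body_lines → Spec_trim_trailing_tags_and_comments_py body_lines (trim_trailing_tags_and_comments_py body_lines)

-- ===== LEMMAS AND PROOFS =====

-- "significant" test shared by the proofs
def pvSig (s : String) : Bool :=
  let t := PySem.Str.strip s
  !(t = "" || PySem.Str.startswith t "@" || PySem.Str.startswith t "#")

def pvFoldB (xs : List String) : Int :=
  (PySem.List.enumerate xs).foldl
    (fun acc p =>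
      let t := PySem.Str.strip p.2
      if t ≠ "" ∧ ¬ PySem.Str.startswith t "@" ∧ ¬ PySem.Str.startswith t "#" then p.1 else acc)
    (-1)

lemma pvFoldB_append (xs : List String) (x : String) :
    pvFoldB (xs ++ [x]) = if pvSig x then (xs.length : Int) else pvFoldB xs := by
  unfold pvFoldB pvSig
  rw [PySem.List.enumerate_append, List.foldl_append]
  simp [PySem.List.enumerate]
  by_cases h1 : PySem.Str.strip x = "" <;>
    by_cases h2 : PySem.Str.startswith (PySem.Str.strip x) "@" = true <;>
      by_cases h3 : PySem.Str.startswith (PySem.Str.strip x) "#" = true <;>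
        simp [h1]

lemma pvFoldB_lt (xs : List String) : pvFoldB xs < (xs.length : Int) := by
  induction xs using List.reverseRecOn with
  | nil => simp [pvFoldB, PySem.List.enumerate]
  | append_singleton xs x ih =>
    rw [pvFoldB_append]
    split <;> simp <;> omega

lemma pvFoldB_neg_one_le (xs : List String) : -1 ≤ pvFoldB xs := by
  induction xs using List.reverseRecOn with
  | nil => simp [pvFoldB, PySem.List.enumerate]
  | append_singleton xs x ih =>
    rw [pvFoldB_append]
    split <;> omega

lemma altB_eq (xs : List String) :
    trim_trailing_tags_and_comments_py_alt xs = xs.take (pvFoldB xs + 1).toNat := by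
  show PySem.List.slice xs none (some (pvFoldB xs + 1)) = _
  rw [PySem.List.slice_to]
  have := pvFoldB_neg_one_le xs
  omega

lemma trimLoopA_concat (xs : List String) (x : String) :
    trimLoopA (xs ++ [x]) = if pvSig x then xs ++ [x] else trimLoopA xs := by
  conv_lhs => unfold trimLoopA
  have hne : xs ++ [x] ≠ [] := by simp
  simp only [dif_neg hne]
  rw [List.getLast_append_singleton, List.dropLast_concat]
  unfold pvSig
  rcases Bool.eq_false_or_eq_true (decide (PySem.Str.strip x = "") ||
      PySem.Str.startswith (PySem.Str.strip x) "@" ||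
      PySem.Str.startswith (PySem.Str.strip x) "#") with h | h <;>
    simp only [h, Bool.not_false, Bool.not_true, if_true, if_false, Bool.false_eq_true]

lemma main_eq (xs : List String) :
    trimLoopA xs = xs.take (pvFoldB xs + 1).toNat := by
  induction xs using List.reverseRecOn with
  | nil =>
    unfold trimLoopA
    simp [pvFoldB, PySem.List.enumerate]
  | append_singleton xs x ih =>
    rw [trimLoopA_concat, pvFoldB_append]
    by_cases hs : pvSig x = true
    · rw [if_pos hs, if_pos hs]
      have h1 : ((xs.length : Int) + 1).toNat = xs.length + 1 := by omega
      rw [h1, List.take_of_length_le (by simp)]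
    · rw [if_neg hs, if_neg hs, ih]
      have hlt := pvFoldB_lt xs
      have hle := pvFoldB_neg_one_le xs
      rw [List.take_append_of_le_length (by omega)]

-- ===== VERDICT (by name: the statement is the Claim_ definition above) =====
theorem trim_trailing_tags_and_comments_py_spec : Claim_equal_trim_trailing_tags_and_comments_py := by
  intro xs _
  unfold Spec_trim_trailing_tags_and_comments_py trim_trailing_tags_and_comments_py
  rw [main_eq, altB_eq]
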